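-- pv_equiv track=rewrite | github.com/jbharg/family-os-bot-v2 | family-os-bot/routing_engine.py | _build_suggested_order
-- ===== SOURCE A (Python) =====
-- def _build_suggested_order(active: list) -> list:
--     """Generate a short ordered list of plain-text action priorities."""
--     order = []
--
--     if any(t.get("effective_state") == "overdue" for t in active):
--         order.append("Resolve overdue items first — they are blocking forward motion")
--     if any(t.get("domain") == "care" and t.get("priority") == "critical" for t in active):
--         order.append("Complete core care tasks early in the week")
--     if any(t.get("domain") == "admissions" and t.get("priority") == "critical" for t in active):
--         order.append("Handle urgent admissions deadlines next")
--     if any(t.get("domain") in ("logistics", "household") for t in active):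
--         order.append("Confirm transportation and household tasks mid-week")
--     if any(t.get("effective_state") == "waiting" for t in active):
--         order.append("Follow up on stale waiting items before the week closes")
--     if not order:
--         order.append("Light week — stay ahead without overloading yourself")
--
--     return order
-- ===== SOURCE B (Python) =====
-- def _build_suggested_order(active: list) -> list:
--     """Generate a short ordered list of plain-text action priorities."""
--     overdue = care_crit = adm_crit = logi = waiting = False
--     for t in active:
--         state = t.get("effective_state")
--         domain = t.get("domain")
--         critical = t.get("priority") == "critical"
--         overdue = overdue or state == "overdue"
--         care_crit = care_crit or (domain == "care" and critical)
--         adm_crit = adm_crit or (domain == "admissions" and critical)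
--         logi = logi or domain in ("logistics", "household")
--         waiting = waiting or state == "waiting"
--
--     order = []
--     if overdue:
--         order.append("Resolve overdue items first — they are blocking forward motion")
--     if care_crit:
--         order.append("Complete core care tasks early in the week")
--     if adm_crit:
--         order.append("Handle urgent admissions deadlines next")
--     if logi:
--         order.append("Confirm transportation and household tasks mid-week")
--     if waiting:
--         order.append("Follow up on stale waiting items before the week closes")
--     return order or ["Light week — stay ahead without overloading yourself"]
-- ===== Notes on version B (the rewrite author's own statement) =====
-- stated objective: alternative
-- what changed: Replaced five separate any(...) scans over the task list with a single pass that accumulates five boolean flags, then emits the fixed strings from those flags.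
import Mathlib
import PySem

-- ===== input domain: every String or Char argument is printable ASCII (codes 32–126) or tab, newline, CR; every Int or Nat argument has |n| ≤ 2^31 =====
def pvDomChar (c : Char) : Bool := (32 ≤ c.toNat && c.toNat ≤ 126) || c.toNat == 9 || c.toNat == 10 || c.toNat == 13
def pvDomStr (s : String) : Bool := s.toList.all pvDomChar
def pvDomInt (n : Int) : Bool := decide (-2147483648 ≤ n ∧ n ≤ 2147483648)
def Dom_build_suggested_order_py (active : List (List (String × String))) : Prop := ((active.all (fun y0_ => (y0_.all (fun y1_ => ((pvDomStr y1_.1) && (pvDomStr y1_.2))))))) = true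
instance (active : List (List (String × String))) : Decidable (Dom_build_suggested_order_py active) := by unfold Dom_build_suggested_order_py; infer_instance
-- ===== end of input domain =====

-- B replaces A's five separate any(...) scans with one pass accumulating five boolean
-- flags and then emits the same fixed strings; same cost, different decomposition.

-- t.get(k) on a dict literal (exact: first match, none when absent)
def pvGet (t : List (String × String)) (k : String) : Option String :=
  (PySem.Dict.mk t).get? k

-- ===== PORT A =====
def build_suggested_order_py (active : List (List (String × String))) : List String :=
  let order : List String := []
  let order := if active.any (fun t => pvGet t "effective_state" == some "overdue") then
      order ++ ["Resolve overdue items first — they are blocking forward motion"] else order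
  let order := if active.any (fun t => pvGet t "domain" == some "care" && pvGet t "priority" == some "critical") then
      order ++ ["Complete core care tasks early in the week"] else order
  let order := if active.any (fun t => pvGet t "domain" == some "admissions" && pvGet t "priority" == some "critical") then
      order ++ ["Handle urgent admissions deadlines next"] else order
  let order := if active.any (fun t => pvGet t "domain" == some "logistics" || pvGet t "domain" == some "household") then
      order ++ ["Confirm transportation and household tasks mid-week"] else order
  let order := if active.any (fun t => pvGet t "effective_state" == some "waiting") then
      order ++ ["Follow up on stale waiting items before the week closes"] else order
  let order := if order.isEmpty then
      order ++ ["Light week — stay ahead without overloading yourself"] else order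
  order

-- ===== PORT B =====
def pvStep (s : Bool × Bool × Bool × Bool × Bool) (t : List (String × String)) :
    Bool × Bool × Bool × Bool × Bool :=
  let state := pvGet t "effective_state"
  let domain := pvGet t "domain"
  let critical := pvGet t "priority" == some "critical"
  ⟨s.1 || state == some "overdue",
   s.2.1 || (domain == some "care" && critical),
   s.2.2.1 || (domain == some "admissions" && critical),
   s.2.2.2.1 || (domain == some "logistics" || domain == some "household"),
   s.2.2.2.2 || state == some "waiting"⟩

def build_suggested_order_py_alt (active : List (List (String × String))) : List String :=
  let flags := active.foldl pvStep (false, false, false, false, false)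
  let order : List String := []
  let order := if flags.1 then order ++ ["Resolve overdue items first — they are blocking forward motion"] else order
  let order := if flags.2.1 then order ++ ["Complete core care tasks early in the week"] else order
  let order := if flags.2.2.1 then order ++ ["Handle urgent admissions deadlines next"] else order
  let order := if flags.2.2.2.1 then order ++ ["Confirm transportation and household tasks mid-week"] else order
  let order := if flags.2.2.2.2 then order ++ ["Follow up on stale waiting items before the week closes"] else order
  if order = [] then ["Light week — stay ahead without overloading yourself"] else order

-- ===== PRECONDITION & SPEC =====
def Spec_build_suggested_order_py (active : List (List (String × String))) (out : List String) : Prop := out = build_suggested_order_py_alt active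
instance (active : List (List (String × String))) (out : List String) : Decidable (Spec_build_suggested_order_py active out) := by unfold Spec_build_suggested_order_py; infer_instance

-- ===== CLAIM (what is proved, stated in full; the proofs are below) =====
def Claim_equal_build_suggested_order_py : Prop := ∀ (active : List (List (String × String))), Dom_build_suggested_order_py active → Spec_build_suggested_order_py active (build_suggested_order_py active)

-- ===== LEMMAS AND PROOFS =====

-- the single fold computes exactly the five any-scans
theorem pvStep_foldl (active : List (List (String × String))) (o c a l w : Bool) :
    active.foldl pvStep (o, c, a, l, w) =
      (o || active.any (fun t => pvGet t "effective_state" == some "overdue"),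
       c || active.any (fun t => pvGet t "domain" == some "care" && pvGet t "priority" == some "critical"),
       a || active.any (fun t => pvGet t "domain" == some "admissions" && pvGet t "priority" == some "critical"),
       l || active.any (fun t => pvGet t "domain" == some "logistics" || pvGet t "domain" == some "household"),
       w || active.any (fun t => pvGet t "effective_state" == some "waiting")) := by
  induction active generalizing o c a l w with
  | nil => simp
  | cons h tl ih => simp [pvStep, ih, Bool.or_assoc]

-- ===== VERDICT (by name: the statement is the Claim_ definition above) =====
theorem build_suggested_order_py_spec : Claim_equal_build_suggested_order_py := by
  intro active _
  unfold Spec_build_suggested_order_py build_suggested_order_py build_suggested_order_py_alt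
  rw [pvStep_foldl]
  simp only [Bool.false_or]
  generalize (active.any fun t => pvGet t "effective_state" == some "overdue") = b1
  generalize (active.any fun t => pvGet t "domain" == some "care" && pvGet t "priority" == some "critical") = b2
  generalize (active.any fun t => pvGet t "domain" == some "admissions" && pvGet t "priority" == some "critical") = b3
  generalize (active.any fun t => pvGet t "domain" == some "logistics" || pvGet t "domain" == some "household") = b4
  generalize (active.any fun t => pvGet t "effective_state" == some "waiting") = b5
  cases b1 <;> cases b2 <;> cases b3 <;> cases b4 <;> cases b5 <;> rfl
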